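-- pv_equiv track=rewrite | github.com/ghadialhajj/DeepRC2 | deeprc/datasets/Simulation/simulation_approach_1.py | _process_motifs
-- ===== SOURCE A (Python) =====
-- def _process_motifs(base_motifs, delete_idxs, replace_idxs):
--     processed_motifs = []
--     for motif in base_motifs:
--         chars = []
--         for idx in range(len(motif)):
--             cur_char = motif[idx] if idx not in replace_idxs else "Z"
--             if idx in delete_idxs:
--                 chars.append(cur_char + "d")
--             else:
--                 chars.append(cur_char)
--         processed_motifs.append("".join(chars))
--     return processed_motifs
-- ===== SOURCE B (Python) =====
-- def _process_motifs(base_motifs, delete_idxs, replace_idxs):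
--     # Dedupe/sort the non-negative indices once, then scatter into each motif,
--     # stopping at the first index past the end (the list is sorted).
--     rep = sorted({i for i in replace_idxs if i >= 0})
--     dele = sorted({i for i in delete_idxs if i >= 0})
--     out = []
--     for motif in base_motifs:
--         n = len(motif)
--         chars = list(motif)
--         for idx in rep:
--             if idx >= n:
--                 break
--             chars[idx] = "Z"
--         for idx in dele:
--             if idx >= n:
--                 break
--             chars[idx] = chars[idx] + "d"
--         out.append("".join(chars))
--     return out
-- ===== Notes on version B (the rewrite author's own statement) =====
-- stated objective: alternative
-- what changed: B dedupes and sorts the non-negative indices once and scatters them into each motif with an early break at the motif's end, instead of A's per-position membership scans over both index lists for every character.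
import Mathlib
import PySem

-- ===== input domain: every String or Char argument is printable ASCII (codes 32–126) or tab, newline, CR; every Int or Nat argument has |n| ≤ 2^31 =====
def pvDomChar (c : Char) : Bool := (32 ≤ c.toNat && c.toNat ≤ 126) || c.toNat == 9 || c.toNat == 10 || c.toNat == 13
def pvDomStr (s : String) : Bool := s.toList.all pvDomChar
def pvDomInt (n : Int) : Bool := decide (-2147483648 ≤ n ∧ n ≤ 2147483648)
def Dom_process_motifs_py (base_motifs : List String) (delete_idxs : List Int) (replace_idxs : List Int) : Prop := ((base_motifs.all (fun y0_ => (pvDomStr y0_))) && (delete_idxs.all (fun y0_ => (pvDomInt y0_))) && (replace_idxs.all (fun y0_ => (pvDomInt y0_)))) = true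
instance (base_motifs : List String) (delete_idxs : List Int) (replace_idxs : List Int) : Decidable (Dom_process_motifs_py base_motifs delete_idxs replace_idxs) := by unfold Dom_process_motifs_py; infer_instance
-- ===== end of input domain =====

-- B sorts the deduped non-negative indices once and scatters them into each motif with an
-- early break, instead of A's per-position membership scans over both index lists.

-- ===== PORT A =====
def process_motifs_py (base_motifs : List String) (delete_idxs : List Int) (replace_idxs : List Int) : List String :=
  base_motifs.foldl (fun processed_motifs motif =>
    let cs := motif.toList
    let chars : List (List Char) :=
      (List.range cs.length).foldl (fun chars (idx : Nat) =>
        let cur_char : List Char :=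
          if ¬ replace_idxs.contains (idx : Int) then [cs.getD idx ' '] else ['Z']
        if delete_idxs.contains (idx : Int) then chars ++ [cur_char ++ ['d']]
        else chars ++ [cur_char]) []
    processed_motifs ++ [String.ofList chars.flatten]) []

-- ===== PORT B =====
-- Source B's 'for idx in rep: if idx >= n: break; chars[idx] = "Z"' loop
def pvScatterSet {α : Type} (n : Int) (v : α) : List Int → List α → List α
  | [], ch => ch
  | idx :: tl, ch => if n ≤ idx then ch else pvScatterSet n v tl (ch.set idx.toNat v)

-- Source B's 'for idx in dele: if idx >= n: break; chars[idx] = chars[idx] + "d"' loop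
def pvScatterMod {α : Type} (n : Int) (f : α → α) : List Int → List α → List α
  | [], ch => ch
  | idx :: tl, ch => if n ≤ idx then ch else pvScatterMod n f tl (ch.modify idx.toNat f)

def process_motifs_py_alt (base_motifs : List String) (delete_idxs : List Int) (replace_idxs : List Int) : List String :=
  let rep := PySem.List.sorted (PySem.Set.ofList (replace_idxs.filter (fun i => 0 ≤ i))) (fun x => x) false
  let dele := PySem.List.sorted (PySem.Set.ofList (delete_idxs.filter (fun i => 0 ≤ i))) (fun x => x) false
  base_motifs.foldl (fun out motif =>
    let chars0 : List (List Char) := motif.toList.map (fun c => [c])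
    let chars1 := pvScatterSet ((chars0.length : Int)) ['Z'] rep chars0
    let chars2 := pvScatterMod ((chars0.length : Int)) (fun s => s ++ ['d']) dele chars1
    out ++ [String.ofList chars2.flatten]) []

-- ===== PRECONDITION & SPEC =====
def Spec_process_motifs_py (base_motifs : List String) (delete_idxs : List Int) (replace_idxs : List Int) (out : List String) : Prop := out = process_motifs_py_alt base_motifs delete_idxs replace_idxs
instance (base_motifs : List String) (delete_idxs : List Int) (replace_idxs : List Int) (out : List String) : Decidable (Spec_process_motifs_py base_motifs delete_idxs replace_idxs out) := by unfold Spec_process_motifs_py; infer_instance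

-- ===== CLAIM (what is proved, stated in full; the proofs are below) =====
def Claim_equal_process_motifs_py : Prop := ∀ (base_motifs : List String) (delete_idxs : List Int) (replace_idxs : List Int), Dom_process_motifs_py base_motifs delete_idxs replace_idxs → Spec_process_motifs_py base_motifs delete_idxs replace_idxs (process_motifs_py base_motifs delete_idxs replace_idxs)

-- ===== LEMMAS AND PROOFS =====

-- pvScatterSet preserves length
lemma pvScatterSet_length {α : Type} (n : Int) (v : α) :
    ∀ (l : List Int) (ch : List α), (pvScatterSet n v l ch).length = ch.length := by
  intro l
  induction l with
  | nil => intro ch; rfl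
  | cons hd tl ih =>
    intro ch
    unfold pvScatterSet
    split
    · rfl
    · rw [ih]; simp

-- pvScatterMod preserves length
lemma pvScatterMod_length {α : Type} (n : Int) (f : α → α) :
    ∀ (l : List Int) (ch : List α), (pvScatterMod n f l ch).length = ch.length := by
  intro l
  induction l with
  | nil => intro ch; rfl
  | cons hd tl ih =>
    intro ch
    unfold pvScatterMod
    split
    · rfl
    · rw [ih]; simp

-- element at i after scattering v over a sorted list of non-negative indices
lemma pvScatterSet_getD {α : Type} (v d : α) (n : Int) :
    ∀ (l : List Int), l.Pairwise (· < ·) → (∀ x ∈ l, 0 ≤ x) →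
      ∀ (ch : List α), (ch.length : Int) = n →
      ∀ (i : Nat), i < ch.length →
      (pvScatterSet n v l ch).getD i d = if (i : Int) ∈ l then v else ch.getD i d := by
  intro l
  induction l with
  | nil => intro _ _ ch _ i _; simp [pvScatterSet]
  | cons hd tl ih =>
    intro hp hnn ch hn i hi
    have hp' : tl.Pairwise (· < ·) := hp.of_cons
    have hlt : ∀ y ∈ tl, hd < y := (List.pairwise_cons.mp hp).1
    have hnn' : ∀ x ∈ tl, 0 ≤ x := fun x hx => hnn x (List.mem_cons_of_mem _ hx)
    have hhd0 : 0 ≤ hd := hnn hd List.mem_cons_self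
    unfold pvScatterSet
    by_cases hb : n ≤ hd
    · rw [if_pos hb]
      have hni : (i : Int) ∉ hd :: tl := by
        intro hmem
        rcases List.mem_cons.mp hmem with h | h
        · omega
        · have := hlt _ h; omega
      simp [hni]
    · rw [if_neg hb]
      rw [ih hp' hnn' (ch.set hd.toNat v) (by simpa using hn) i (by simpa using hi)]
      by_cases he : hd = (i : Int)
      · have hti : hd.toNat = i := by omega
        have hm : (i : Int) ∉ tl := by
          intro hmem; have := hlt _ hmem; omega
        simp [hm, he, hti, List.getElem?_set_self, hi]
      · have hne : hd.toNat ≠ i := by omega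
        have hset : (ch.set hd.toNat v).getD i d = ch.getD i d := by
          rw [List.getD_eq_getElem _ _ (by simpa using hi),
              List.getD_eq_getElem _ _ hi]
          simp [hne]
        rw [hset]
        by_cases hm : (i : Int) ∈ tl
        · simp [hm]
        · have h1 : ((i : Int) ∈ hd :: tl) = False := by
            simp [hm]; omega
          simp [h1, hm]

-- element at i after applying f at every index of a sorted list of non-negative indices
lemma pvScatterMod_getD {α : Type} (f : α → α) (d : α) (n : Int) :
    ∀ (l : List Int), l.Pairwise (· < ·) → (∀ x ∈ l, 0 ≤ x) →
      ∀ (ch : List α), (ch.length : Int) = n →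
      ∀ (i : Nat), i < ch.length →
      (pvScatterMod n f l ch).getD i d = if (i : Int) ∈ l then f (ch.getD i d) else ch.getD i d := by
  intro l
  induction l with
  | nil => intro _ _ ch _ i _; simp [pvScatterMod]
  | cons hd tl ih =>
    intro hp hnn ch hn i hi
    have hp' : tl.Pairwise (· < ·) := hp.of_cons
    have hlt : ∀ y ∈ tl, hd < y := (List.pairwise_cons.mp hp).1
    have hnn' : ∀ x ∈ tl, 0 ≤ x := fun x hx => hnn x (List.mem_cons_of_mem _ hx)
    have hhd0 : 0 ≤ hd := hnn hd List.mem_cons_self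
    unfold pvScatterMod
    by_cases hb : n ≤ hd
    · rw [if_pos hb]
      have hni : (i : Int) ∉ hd :: tl := by
        intro hmem
        rcases List.mem_cons.mp hmem with h | h
        · omega
        · have := hlt _ h; omega
      simp [hni]
    · rw [if_neg hb]
      rw [ih hp' hnn' (ch.modify hd.toNat f) (by simpa using hn) i (by simpa using hi)]
      by_cases he : hd = (i : Int)
      · have hti : hd.toNat = i := by omega
        have hm : (i : Int) ∉ tl := by
          intro hmem; have := hlt _ hmem; omega
        simp [hm, he, hti, List.getElem?_eq_getElem hi]
      · have hne : hd.toNat ≠ i := by omega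
        have hmod : (ch.modify hd.toNat f).getD i d = ch.getD i d := by
          rw [List.getD_eq_getElem _ _ (by simpa using hi),
              List.getD_eq_getElem _ _ hi]
          simp [hne]
        rw [hmod]
        by_cases hm : (i : Int) ∈ tl
        · simp [hm]
        · have h1 : ((i : Int) ∈ hd :: tl) = False := by
            simp [hm]; omega
          simp [h1, hm]

-- membership in the sorted, deduped, non-negative index list, at a Nat position
lemma mem_sorted_nonneg (xs : List Int) (i : Nat) :
    ((i : Int) ∈ PySem.List.sorted (PySem.Set.ofList (xs.filter (fun i => 0 ≤ i))) (fun x => x) false)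
      ↔ (i : Int) ∈ xs := by
  rw [PySem.List.mem_sorted, PySem.Set.mem_ofList, List.mem_filter]
  simp

-- the per-motif character blocks produced by the two ports coincide
lemma per_motif_eq (motif : String) (delete_idxs replace_idxs : List Int) :
    ((List.range motif.toList.length).foldl (fun chars (idx : Nat) =>
        let cur_char : List Char :=
          if ¬ replace_idxs.contains (idx : Int) then [motif.toList.getD idx ' '] else ['Z']
        if delete_idxs.contains (idx : Int) then chars ++ [cur_char ++ ['d']]
        else chars ++ [cur_char]) [])
    = (pvScatterMod (((motif.toList.map (fun c => [c])).length : Int)) (fun s => s ++ ['d'])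
        (PySem.List.sorted (PySem.Set.ofList (delete_idxs.filter (fun i => 0 ≤ i))) (fun x => x) false)
        (pvScatterSet (((motif.toList.map (fun c => [c])).length : Int)) ['Z']
          (PySem.List.sorted (PySem.Set.ofList (replace_idxs.filter (fun i => 0 ≤ i))) (fun x => x) false)
          (motif.toList.map (fun c => [c])))) := by
  set cs := motif.toList with hcs
  set n : Int := ((cs.map (fun c => [c])).length : Int) with hn
  set rep := PySem.List.sorted (PySem.Set.ofList (replace_idxs.filter (fun i => 0 ≤ i))) (fun x => x) false with hrep
  set dele := PySem.List.sorted (PySem.Set.ofList (delete_idxs.filter (fun i => 0 ≤ i))) (fun x => x) false with hdele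
  have hprep : rep.Pairwise (· < ·) := PySem.List.sorted_ofList_pairwise_lt _
  have hpdele : dele.Pairwise (· < ·) := PySem.List.sorted_ofList_pairwise_lt _
  have hnnrep : ∀ x ∈ rep, 0 ≤ x := by
    intro x hx
    rw [hrep, PySem.List.mem_sorted, PySem.Set.mem_ofList, List.mem_filter] at hx
    simpa using hx.2
  have hnndele : ∀ x ∈ dele, 0 ≤ x := by
    intro x hx
    rw [hdele, PySem.List.mem_sorted, PySem.Set.mem_ofList, List.mem_filter] at hx
    simpa using hx.2
  -- A's side is a map over range
  have hA : ((List.range cs.length).foldl (fun chars (idx : Nat) =>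
        let cur_char : List Char :=
          if ¬ replace_idxs.contains (idx : Int) then [cs.getD idx ' '] else ['Z']
        if delete_idxs.contains (idx : Int) then chars ++ [cur_char ++ ['d']]
        else chars ++ [cur_char]) [])
      = (List.range cs.length).map (fun (idx : Nat) =>
          let cur_char : List Char :=
            if ¬ replace_idxs.contains (idx : Int) then [cs.getD idx ' '] else ['Z']
          if delete_idxs.contains (idx : Int) then cur_char ++ ['d'] else cur_char) := by
    have := PySem.List.foldl_append_singleton_eq_map
      (l := List.range cs.length)
      (f := fun (idx : Nat) =>
        let cur_char : List Char :=
          if ¬ replace_idxs.contains (idx : Int) then [cs.getD idx ' '] else ['Z']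
        if delete_idxs.contains (idx : Int) then cur_char ++ ['d'] else cur_char)
      (acc := ([] : List (List Char)))
    rw [← List.nil_append ((List.range cs.length).map (fun (idx : Nat) =>
        let cur_char : List Char :=
          if ¬ replace_idxs.contains (idx : Int) then [cs.getD idx ' '] else ['Z']
        if delete_idxs.contains (idx : Int) then cur_char ++ ['d'] else cur_char)), ← this]
    congr 1
    funext chars idx
    by_cases h : (idx : Int) ∈ delete_idxs <;> simp [h]
  rw [hA]
  apply List.ext_getElem
  · rw [pvScatterMod_length, pvScatterSet_length]; simp
  · intro i h1 h2
    have hi : i < cs.length := by simpa using h1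
    have hi' : i < (pvScatterSet n ['Z'] rep (cs.map (fun c => [c]))).length := by
      rw [pvScatterSet_length]; simpa using hi
    rw [← List.getD_eq_getElem _ ([] : List Char) h1,
        ← List.getD_eq_getElem _ ([] : List Char) h2]
    rw [pvScatterMod_getD (fun s => s ++ ['d']) ([] : List Char) n dele hpdele hnndele _
          (by rw [pvScatterSet_length]) i hi']
    rw [pvScatterSet_getD (['Z'] : List Char) ([] : List Char) n rep hprep hnnrep
          (cs.map (fun c => [c])) rfl i (by simpa using hi)]
    have hmemd : ((i : Int) ∈ dele) ↔ (i : Int) ∈ delete_idxs := mem_sorted_nonneg _ i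
    have hmemr : ((i : Int) ∈ rep) ↔ (i : Int) ∈ replace_idxs := mem_sorted_nonneg _ i
    rw [List.getD_eq_getElem _ _ (by simpa using hi)]
    simp only [List.getElem_map, List.getElem_range]
    by_cases hd : (i : Int) ∈ delete_idxs <;>
      by_cases hr : (i : Int) ∈ replace_idxs <;>
        simp [hd, hr, hmemd, hmemr, List.getElem?_eq_getElem hi]

-- ===== VERDICT (by name: the statement is the Claim_ definition above) =====
theorem process_motifs_py_spec : Claim_equal_process_motifs_py := by
  intro base_motifs delete_idxs replace_idxs _
  unfold Spec_process_motifs_py process_motifs_py process_motifs_py_alt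
  show (base_motifs.foldl (fun processed_motifs motif => processed_motifs ++
          [String.ofList (((List.range motif.toList.length).foldl (fun chars (idx : Nat) =>
              let cur_char : List Char :=
                if ¬ replace_idxs.contains (idx : Int) then [motif.toList.getD idx ' '] else ['Z']
              if delete_idxs.contains (idx : Int) then chars ++ [cur_char ++ ['d']]
              else chars ++ [cur_char]) []).flatten)]) [])
      = (base_motifs.foldl (fun out motif => out ++
          [String.ofList ((pvScatterMod (((motif.toList.map (fun c => [c])).length : Int)) (fun s => s ++ ['d'])
              (PySem.List.sorted (PySem.Set.ofList (delete_idxs.filter (fun i => 0 ≤ i))) (fun x => x) false)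
              (pvScatterSet (((motif.toList.map (fun c => [c])).length : Int)) ['Z']
                (PySem.List.sorted (PySem.Set.ofList (replace_idxs.filter (fun i => 0 ≤ i))) (fun x => x) false)
                (motif.toList.map (fun c => [c])))).flatten)]) [])
  rw [PySem.List.foldl_append_singleton_eq_map, PySem.List.foldl_append_singleton_eq_map]
  simp only [List.nil_append]
  exact List.map_congr_left (fun m _ =>
    congrArg String.ofList (congrArg List.flatten (per_motif_eq m delete_idxs replace_idxs)))
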